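-- pv_equiv track=rewrite | github.com/Jackylkk2003/my-ctf-challenges | firebird-ctf-2025/magical-runes/src/solve.py | check
-- ===== SOURCE A (Python) =====
-- import copy
--
-- p = 127
--
-- m = 4099
--
-- def hash(s):
--     h = 0
--     for c in s:
--         h = (h * p + ord(c)) % m
--     return h
--
-- def check(arr, s):
--     a = copy.deepcopy(arr)
--     for i in range(len(s)):
--         if hash(s[i:]) in a:
--             a.remove(hash(s[i:]))
--         else:
--             return False
--     return True
-- ===== SOURCE B (Python) =====
-- from collections import Counter
--
-- p = 127
-- m = 4099
--
-- def check(arr, s):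
--     need = Counter()
--     h = 0
--     pw = 1
--     for c in reversed(s):
--         h = (ord(c) * pw + h) % m
--         pw = (pw * p) % m
--         need[h] += 1
--     have = Counter(arr)
--     return all(need[k] <= have[k] for k in need)
-- ===== Notes on version B (the rewrite author's own statement) =====
-- stated objective: faster
-- what changed: A rehashes each suffix from scratch and removes matches from a list copy; B computes all suffix hashes in one right-to-left rolling-hash pass and checks multiset containment with Counters.
import Mathlib
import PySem

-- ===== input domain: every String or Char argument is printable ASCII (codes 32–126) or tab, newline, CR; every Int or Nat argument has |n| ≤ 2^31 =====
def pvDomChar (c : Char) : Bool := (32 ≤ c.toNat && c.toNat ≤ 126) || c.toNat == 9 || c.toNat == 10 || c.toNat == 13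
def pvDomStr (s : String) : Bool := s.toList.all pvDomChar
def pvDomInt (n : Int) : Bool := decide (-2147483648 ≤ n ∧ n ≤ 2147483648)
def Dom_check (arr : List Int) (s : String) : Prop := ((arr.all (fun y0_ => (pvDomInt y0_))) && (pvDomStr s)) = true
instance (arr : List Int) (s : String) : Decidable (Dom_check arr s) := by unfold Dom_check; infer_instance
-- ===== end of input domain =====

-- B replaces A's per-suffix rehashing and list.remove scans with one right-to-left
-- rolling-hash pass and a Counter containment check (objective: faster).

-- ===== PORT A =====
-- hash(s): h = (h * 127 + ord(c)) % 4099 over the characters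
def pyHash (l : List Char) : Int :=
  l.foldl (fun h c => PySem.Int.mod (h * 127 + (c.toNat : Int)) 4099) 0

-- the for-loop of check: for each remaining index i, test membership of hash(s[i:]) and remove it
def checkLoop (l : List Char) (idxs : List Int) (a : List Int) : Bool :=
  match idxs with
  | [] => true
  | i :: rest =>
    let hv := pyHash (PySem.List.slice l (some i) none)
    if hv ∈ a then checkLoop l rest (a.erase hv) else false

def check (arr : List Int) (s : String) : Bool :=
  checkLoop s.toList (PySem.List.pyRange 0 (PySem.Str.len s) 1) arr

-- ===== PORT B =====
-- loop body over reversed(s): h = rolling suffix hash, pw = 127^k % 4099, need[h] += 1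
def rollStep (st : Int × Int × PySem.Dict Int Int) (c : Char) : Int × Int × PySem.Dict Int Int :=
  let h := PySem.Int.mod ((c.toNat : Int) * st.2.1 + st.1) 4099
  (h, PySem.Int.mod (st.2.1 * 127) 4099, st.2.2.modify h 0 (· + 1))

def check_alt (arr : List Int) (s : String) : Bool :=
  let st := s.toList.reverse.foldl rollStep (0, 1, PySem.Dict.empty)
  let need := st.2.2
  let haveC := PySem.Dict.counter arr
  need.keys.all (fun k => need.getD k 0 ≤ haveC.getD k 0)

-- ===== PRECONDITION & SPEC =====
def Spec_check (arr : List Int) (s : String) (out : Bool) : Prop := out = check_alt arr s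
instance (arr : List Int) (s : String) (out : Bool) : Decidable (Spec_check arr s out) := by unfold Spec_check; infer_instance

-- ===== CLAIM (what is proved, stated in full; the proofs are below) =====
def Claim_equal_check : Prop := ∀ (arr : List Int) (s : String), Dom_check arr s → Spec_check arr s (check arr s)

-- ===== LEMMAS AND PROOFS =====

-- the hashes of the nonempty suffixes, longest suffix first
def SH : List Char → List Int
  | [] => []
  | c :: t => pyHash (c :: t) :: SH t

theorem mod_eq (x : Int) : PySem.Int.mod x 4099 = x % 4099 :=
  PySem.Int.mod_eq_emod_of_pos (by norm_num)

theorem emod_self_modEq (a : Int) : Int.ModEq 4099 (a % 4099) a :=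
  Int.emod_emod_of_dvd a dvd_rfl

-- shifting lemma for the hash accumulator
theorem hashAux_shift (t : List Char) (h : Int) (h0 : 0 ≤ h) (h1 : h < 4099) :
    t.foldl (fun h c => PySem.Int.mod (h * 127 + (c.toNat : Int)) 4099) h
      = (h * 127 ^ t.length + pyHash t) % 4099 := by
  induction t generalizing h with
  | nil => simp [pyHash, Int.emod_eq_of_lt h0 h1]
  | cons c t ih =>
    have hstep0 : (0 : Int) ≤ (h * 127 + (c.toNat : Int)) % 4099 :=
      Int.emod_nonneg _ (by norm_num)
    have hstep1 : (h * 127 + (c.toNat : Int)) % 4099 < 4099 :=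
      Int.emod_lt_of_pos _ (by norm_num)
    have hc0 : (0 : Int) ≤ ((c.toNat : Int)) % 4099 := Int.emod_nonneg _ (by norm_num)
    have hc1 : ((c.toNat : Int)) % 4099 < 4099 := Int.emod_lt_of_pos _ (by norm_num)
    have hc : pyHash (c :: t)
        = (((c.toNat : Int)) % 4099 * 127 ^ t.length + pyHash t) % 4099 := by
      have := ih (((0 : Int) * 127 + (c.toNat : Int)) % 4099) (by simpa using hc0) (by simpa using hc1)
      simpa [pyHash, List.foldl_cons, mod_eq] using this
    rw [List.foldl_cons, mod_eq, ih _ hstep0 hstep1, hc, List.length_cons]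
    show Int.ModEq 4099 _ _
    calc (h * 127 + (c.toNat : Int)) % 4099 * 127 ^ t.length + pyHash t
        ≡ (h * 127 + (c.toNat : Int)) * 127 ^ t.length + pyHash t [ZMOD 4099] :=
          ((emod_self_modEq _).mul_right _).add_right _
      _ = h * 127 ^ (t.length + 1) + ((c.toNat : Int)) * 127 ^ t.length + pyHash t := by ring
      _ ≡ h * 127 ^ (t.length + 1) + ((c.toNat : Int)) % 4099 * 127 ^ t.length + pyHash t [ZMOD 4099] :=
          ((((emod_self_modEq _).symm.mul_right _).add_left _).add_right _)
      _ = h * 127 ^ (t.length + 1) + (((c.toNat : Int)) % 4099 * 127 ^ t.length + pyHash t) := by ring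
      _ ≡ h * 127 ^ (t.length + 1) + (((c.toNat : Int)) % 4099 * 127 ^ t.length + pyHash t) % 4099 [ZMOD 4099] :=
          (emod_self_modEq _).symm.add_left _

-- pyHash of a cons, in rolled form
theorem pyHash_cons (c : Char) (t : List Char) :
    pyHash (c :: t) = ((c.toNat : Int) * 127 ^ t.length + pyHash t) % 4099 := by
  have h0 : (0 : Int) ≤ ((c.toNat : Int)) % 4099 := Int.emod_nonneg _ (by norm_num)
  have h1 : ((c.toNat : Int)) % 4099 < 4099 := Int.emod_lt_of_pos _ (by norm_num)
  have := hashAux_shift t (((0 : Int) * 127 + (c.toNat : Int)) % 4099) (by simpa using h0) (by simpa using h1)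
  have h2 : pyHash (c :: t) = (((c.toNat : Int)) % 4099 * 127 ^ t.length + pyHash t) % 4099 := by
    simpa [pyHash, List.foldl_cons, mod_eq] using this
  rw [h2]
  show Int.ModEq 4099 _ _
  exact ((emod_self_modEq _).mul_right _).add_right _

-- the rolling-hash recurrence used by B
theorem roll_h (c : Char) (t : List Char) :
    ((c.toNat : Int) * (127 ^ t.length % 4099) + pyHash t) % 4099 = pyHash (c :: t) := by
  rw [pyHash_cons]
  show Int.ModEq 4099 _ _
  exact ((emod_self_modEq _).mul_left _).add_right _

-- A's hash list over range(len(s)) is SH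
theorem hashList_eq_SH (l : List Char) :
    (List.range l.length).map (fun k => pyHash (l.drop k)) = SH l := by
  induction l with
  | nil => simp [SH]
  | cons c t ih =>
    rw [List.length_cons, List.range_succ_eq_map]
    simp only [List.map_cons, List.map_map, List.drop_zero]
    rw [SH]
    have htail : (List.range t.length).map ((fun k => pyHash ((c :: t).drop k)) ∘ (fun i => i + 1))
        = SH t := by
      rw [← ih]
      apply List.map_congr_left
      intro k _
      simp
    rw [htail]

-- the rolling fold in closed form
theorem roll_eq (l : List Char) :
    l.reverse.foldl rollStep (0, 1, PySem.Dict.empty)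
      = (pyHash l, (127 : Int) ^ l.length % 4099, PySem.Dict.counter (SH l).reverse) := by
  induction l with
  | nil => simp [pyHash, SH, PySem.Dict.counter]
  | cons c t ih =>
    rw [List.reverse_cons, List.foldl_append, ih]
    simp only [List.foldl_cons, List.foldl_nil, rollStep, mod_eq]
    refine Prod.ext ?_ (Prod.ext ?_ ?_)
    · exact roll_h c t
    · show (127 ^ t.length % 4099 * 127) % 4099 = 127 ^ (c :: t).length % 4099
      rw [List.length_cons, pow_succ]
      exact (emod_self_modEq _).mul_right _
    · show (PySem.Dict.counter (SH t).reverse).modify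
          (((c.toNat : Int) * (127 ^ t.length % 4099) + pyHash t) % 4099) 0 (· + 1)
          = PySem.Dict.counter (SH (c :: t)).reverse
      rw [roll_h, SH, List.reverse_cons, PySem.Dict.counter_append_singleton]

-- the remove-loop of A over a list of values
def greedy (vs a : List Int) : Bool :=
  match vs with
  | [] => true
  | v :: r => if v ∈ a then greedy r (a.erase v) else false

theorem checkLoop_eq_greedy (l : List Char) (idxs : List Int) (a : List Int) :
    checkLoop l idxs a = greedy (idxs.map (fun i => pyHash (PySem.List.slice l (some i) none))) a := by
  induction idxs generalizing a with
  | nil => rfl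
  | cons i rest ih =>
    simp only [checkLoop, greedy, List.map_cons]
    split_ifs <;> simp [ih]

theorem greedy_iff (vs : List Int) : ∀ a : List Int,
    (greedy vs a = true) ↔ ∀ v, vs.count v ≤ a.count v := by
  induction vs with
  | nil => intro a; simp [greedy]
  | cons v r ih =>
    intro a
    rw [greedy]
    by_cases hv : v ∈ a
    · simp only [hv, if_true, ih]
      have hpos : 0 < List.count v a := List.count_pos_iff.mpr hv
      constructor
      · intro H x
        have Hx := H x
        simp only [List.count_cons, List.count_erase] at Hx ⊢
        by_cases hxv : v = x
        · subst hxv; simp at Hx ⊢; omega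
        · simp [hxv] at Hx ⊢; omega
      · intro H x
        have Hx := H x
        simp only [List.count_cons, List.count_erase] at Hx ⊢
        by_cases hxv : v = x
        · subst hxv; simp at Hx ⊢; omega
        · simp [hxv] at Hx ⊢; omega
    · simp only [hv, if_false]
      refine iff_of_false (by simp) ?_
      intro H
      have := H v
      rw [List.count_cons_self, List.count_eq_zero_of_not_mem hv] at this
      omega

-- B = count containment over SH
theorem check_alt_iff (arr : List Int) (s : String) :
    check_alt arr s = true ↔ ∀ v, (SH s.toList).count v ≤ arr.count v := by
  unfold check_alt
  rw [roll_eq]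
  simp only [List.all_eq_true, PySem.Dict.keys_counter, PySem.Dict.getD_counter]
  constructor
  · intro H v
    by_cases hv : v ∈ SH s.toList
    · have := H v (by simp [PySem.Set.mem_ofList, hv])
      simp only [decide_eq_true_eq, List.count_reverse] at this
      exact_mod_cast this
    · simp [List.count_eq_zero_of_not_mem hv]
  · intro H v hmem
    have := H v
    simp only [decide_eq_true_eq, List.count_reverse]
    exact_mod_cast this

-- ===== VERDICT (by name: the statement is the Claim_ definition above) =====
theorem check_spec : Claim_equal_check := by
  intro arr s _
  show check arr s = check_alt arr s
  have hA : check arr s = greedy (SH s.toList) arr := by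
    unfold check
    rw [checkLoop_eq_greedy]
    congr 1
    rw [← hashList_eq_SH]
    have : PySem.Str.len s = ((s.toList.length : Nat) : Int) := by
      simp [PySem.Str.len_eq]
    rw [this, PySem.List.pyRange_zero_natCast, List.map_map]
    apply List.map_congr_left
    intro k _
    simp [PySem.List.slice_from_natCast]
  rw [hA, Bool.eq_iff_iff, greedy_iff, check_alt_iff]
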